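-- pv_equiv track=rewrite | github.com/HaichaoLiang/WhatToPlay-Context-Aware-Game-Recommender | backend/scripts/enrich_metadata_from_steam.py | infer_multiplayer_mode
-- ===== SOURCE A (Python) =====
-- def infer_multiplayer_mode(categories):
--     names = {c.get("description", "").lower() for c in categories or []}
--     if any("co-op" in n or "coop" in n for n in names):
--         return "coop"
--     if any("pvp" in n or "multiplayer" in n for n in names):
--         return "pvp"
--     if any("mmo" in n for n in names):
--         return "mmo"
--     return "solo"
-- ===== SOURCE B (Python) =====
-- def infer_multiplayer_mode(categories):
--     has_coop = has_pvp = has_mmo = False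
--     for c in categories or []:
--         n = c.get("description", "").lower()
--         if "co-op" in n or "coop" in n:
--             has_coop = True
--         if "pvp" in n or "multiplayer" in n:
--             has_pvp = True
--         if "mmo" in n:
--             has_mmo = True
--     if has_coop:
--         return "coop"
--     if has_pvp:
--         return "pvp"
--     if has_mmo:
--         return "mmo"
--     return "solo"
-- ===== Notes on version B (the rewrite author's own statement) =====
-- stated objective: alternative
-- what changed: Replaces the set comprehension plus three separate any() scans over the names with a single accumulating pass that lowercases each description once and maintains three boolean flags, followed by the priority chain.
import Mathlib
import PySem

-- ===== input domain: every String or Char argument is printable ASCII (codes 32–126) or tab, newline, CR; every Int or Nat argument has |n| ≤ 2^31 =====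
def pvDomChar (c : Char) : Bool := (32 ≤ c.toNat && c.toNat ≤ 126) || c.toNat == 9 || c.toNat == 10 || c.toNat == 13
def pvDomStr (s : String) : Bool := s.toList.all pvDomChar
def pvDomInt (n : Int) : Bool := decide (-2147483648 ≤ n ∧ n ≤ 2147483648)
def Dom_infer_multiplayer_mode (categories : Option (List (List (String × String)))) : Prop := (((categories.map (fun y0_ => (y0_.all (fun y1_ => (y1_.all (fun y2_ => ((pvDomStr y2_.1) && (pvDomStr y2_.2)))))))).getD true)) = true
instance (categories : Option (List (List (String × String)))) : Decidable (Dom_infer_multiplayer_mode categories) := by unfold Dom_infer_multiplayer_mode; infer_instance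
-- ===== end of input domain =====

-- B replaces the set comprehension plus three any() scans with one accumulating pass
-- maintaining three boolean flags, then the same priority chain (objective: alternative).

-- ===== PORT A =====
def infer_multiplayer_mode (categories : Option (List (List (String × String)))) : String :=
  let names : PySem.Set String :=
    PySem.Set.ofList ((categories.getD []).map
      (fun c => PySem.Str.lower (PySem.Dict.getD (PySem.Dict.mk c) "description" "")))
  if names.any (fun n => PySem.Str.isIn "co-op" n || PySem.Str.isIn "coop" n) then "coop"
  else if names.any (fun n => PySem.Str.isIn "pvp" n || PySem.Str.isIn "multiplayer" n) then "pvp"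
  else if names.any (fun n => PySem.Str.isIn "mmo" n) then "mmo"
  else "solo"

-- ===== PORT B =====
def infer_multiplayer_mode_alt (categories : Option (List (List (String × String)))) : String :=
  let flags : Bool × Bool × Bool :=
    (categories.getD []).foldl
      (fun (st : Bool × Bool × Bool) c =>
        let n := PySem.Str.lower (PySem.Dict.getD (PySem.Dict.mk c) "description" "")
        (st.1 || (PySem.Str.isIn "co-op" n || PySem.Str.isIn "coop" n),
         st.2.1 || (PySem.Str.isIn "pvp" n || PySem.Str.isIn "multiplayer" n),
         st.2.2 || PySem.Str.isIn "mmo" n))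
      (false, false, false)
  if flags.1 then "coop"
  else if flags.2.1 then "pvp"
  else if flags.2.2 then "mmo"
  else "solo"

-- ===== PRECONDITION & SPEC =====
def Spec_infer_multiplayer_mode (categories : Option (List (List (String × String)))) (out : String) : Prop := out = infer_multiplayer_mode_alt categories
instance (categories : Option (List (List (String × String)))) (out : String) : Decidable (Spec_infer_multiplayer_mode categories out) := by unfold Spec_infer_multiplayer_mode; infer_instance

-- ===== CLAIM =====
def Claim_equal_infer_multiplayer_mode : Prop := ∀ (categories : Option (List (List (String × String)))), Dom_infer_multiplayer_mode categories → Spec_infer_multiplayer_mode categories (infer_multiplayer_mode categories)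

-- ===== LEMMAS AND PROOFS =====
-- any over a Python set built from a list = any over the list (membership is the same)
theorem set_ofList_any {α : Type} [BEq α] [LawfulBEq α] (xs : List α) (p : α → Bool) :
    (PySem.Set.ofList xs).any p = xs.any p := by
  rcases h : xs.any p with _ | _
  · rw [List.any_eq_false] at h ⊢
    intro x hx
    exact h x ((PySem.Set.mem_ofList xs x).1 hx)
  · rw [List.any_eq_true] at h ⊢
    obtain ⟨x, hx, hp⟩ := h
    exact ⟨x, (PySem.Set.mem_ofList xs x).2 hx, hp⟩

-- B's fold computes the three any's, for any starting accumulator.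
theorem fold_flags (cs : List (List (String × String))) (a b c : Bool) :
    cs.foldl
      (fun (st : Bool × Bool × Bool) cat =>
        let n := PySem.Str.lower (PySem.Dict.getD (PySem.Dict.mk cat) "description" "")
        (st.1 || (PySem.Str.isIn "co-op" n || PySem.Str.isIn "coop" n),
         st.2.1 || (PySem.Str.isIn "pvp" n || PySem.Str.isIn "multiplayer" n),
         st.2.2 || PySem.Str.isIn "mmo" n))
      (a, b, c) =
    (a || cs.any (fun cat => let n := PySem.Str.lower (PySem.Dict.getD (PySem.Dict.mk cat) "description" "");
            PySem.Str.isIn "co-op" n || PySem.Str.isIn "coop" n),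
     b || cs.any (fun cat => let n := PySem.Str.lower (PySem.Dict.getD (PySem.Dict.mk cat) "description" "");
            PySem.Str.isIn "pvp" n || PySem.Str.isIn "multiplayer" n),
     c || cs.any (fun cat => PySem.Str.isIn "mmo" (PySem.Str.lower (PySem.Dict.getD (PySem.Dict.mk cat) "description" "")))) := by
  induction cs generalizing a b c with
  | nil => simp
  | cons hd tl ih =>
    simp only [List.foldl_cons, List.any_cons, ih, Bool.or_assoc]

-- ===== VERDICT =====
theorem infer_multiplayer_mode_spec : Claim_equal_infer_multiplayer_mode := by
  intro categories _
  unfold Spec_infer_multiplayer_mode infer_multiplayer_mode infer_multiplayer_mode_alt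
  simp only [fold_flags, set_ofList_any, List.any_map, Bool.false_or, Function.comp_def]
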